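-- pv_equiv track=rewrite | github.com/softwarefactory-project/zuulfmt | zuulfmt/__init__.py | split_items
-- ===== SOURCE A (Python) =====
-- from typing import List, Tuple
--
-- def split_items(content: str) -> List[str]:
--     """Split a YAML map into a list of items.
--
--     >>> nl = chr(10)
--     >>> split_items('  key: |' + nl + '    str' + nl + '  attr: value')
--     ['  key: |\\n    str', '  attr: value']
--     """
--     result: List[str] = []
--     prefix = "    " if content.startswith("    ") else "  "
--     item, pos = "", 0
--     content = "\n" + content + "\n" + prefix + "eof"
--     for pos in range(len(content)):
--         if (
--             content[pos:].startswith("\n" + prefix)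
--             and content[pos + len(prefix) + 1] != " "
--         ):
--             result.append(item[1:])
--             item = content[pos]
--         else:
--             item += content[pos]
--
--     return result[1:]
-- ===== SOURCE B (Python) =====
-- from typing import List
--
-- def split_items(content: str) -> List[str]:
--     """Split a YAML map into a list of items (index-table + slicing rewrite)."""
--     prefix = "    " if content.startswith("    ") else "  "
--     t = "\n" + content + "\n" + prefix + "eof"
--     marker = "\n" + prefix
--     m = len(marker)
--     bounds = [p for p in range(len(t)) if t[p:p + m] == marker and t[p + m] != " "]
--     return [t[b + 1:e] for b, e in zip(bounds, bounds[1:])]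
-- ===== Notes on version B (the rewrite author's own statement) =====
-- stated objective: faster
-- what changed: A's single char-accumulating state-machine loop (which slices content[pos:] at every position) is replaced by a two-pass shape: first collect the list of top-level boundary offsets (positions where '\n'+prefix begins a non-continuation line), then emit one slice t[b+1:e] per consecutive pair of offsets.
import Mathlib
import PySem

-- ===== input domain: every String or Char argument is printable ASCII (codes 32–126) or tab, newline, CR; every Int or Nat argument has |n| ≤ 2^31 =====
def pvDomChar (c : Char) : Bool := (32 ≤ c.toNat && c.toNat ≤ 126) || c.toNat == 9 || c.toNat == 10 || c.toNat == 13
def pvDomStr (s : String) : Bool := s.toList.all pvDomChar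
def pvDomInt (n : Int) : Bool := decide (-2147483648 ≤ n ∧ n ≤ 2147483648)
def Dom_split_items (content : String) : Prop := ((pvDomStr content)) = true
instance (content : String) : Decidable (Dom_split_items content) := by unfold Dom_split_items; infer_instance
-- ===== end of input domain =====

-- B replaces A's single char-accumulating loop (which slices content[pos:] at every position) with a boundary-offset table built first and a slicing pass over consecutive offsets; measurably faster.

-- ===== PORT A =====
-- literal port of A's loop: state (result, item); content[pos + len(prefix) + 1] is ported as
-- pyGet? compared with `!= some ' '` (that index is always in range: the sentinel-extended
-- string ends in "eof", so "\n" + prefix is never a suffix and Python never raises here).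
def split_items (content : String) : List String :=
  let cs := content.toList
  let pfx : List Char := if PySem.Chars.startswith cs "    ".toList then "    ".toList else "  ".toList
  let t : List Char := '\n' :: (cs ++ '\n' :: (pfx ++ "eof".toList))
  let fin := (PySem.List.pyRange 0 (PySem.List.len t) 1).foldl
    (fun (st : List (List Char) × List Char) (pos : Int) =>
      if PySem.Chars.startswith (PySem.List.slice t (some pos) none) ('\n' :: pfx)
          && (PySem.List.pyGet? t (pos + PySem.List.len pfx + 1) != some ' ')
      then (st.1 ++ [PySem.List.slice st.2 (some 1) none], [PySem.List.pyGetD t pos ' '])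
      else (st.1, st.2 ++ [PySem.List.pyGetD t pos ' ']))
    ([], [])
  (PySem.List.slice fin.1 (some 1) none).map String.ofList

-- ===== PORT B =====
def split_items_alt (content : String) : List String :=
  let cs := content.toList
  let pfx : List Char := if PySem.Chars.startswith cs "    ".toList then "    ".toList else "  ".toList
  let t : List Char := '\n' :: (cs ++ '\n' :: (pfx ++ "eof".toList))
  let marker : List Char := '\n' :: pfx
  let m : Int := PySem.List.len marker
  let bounds := (PySem.List.pyRange 0 (PySem.List.len t) 1).filter
    (fun p => (PySem.List.slice t (some p) (some (p + m)) == marker)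
              && (PySem.List.pyGet? t (p + m) != some ' '))
  (bounds.zip (PySem.List.slice bounds (some 1) none)).map
    (fun be => String.ofList (PySem.List.slice t (some (be.1 + 1)) (some be.2)))

-- ===== PRECONDITION & SPEC =====
def Spec_split_items (content : String) (out : List String) : Prop := out = split_items_alt content
instance (content : String) (out : List String) : Decidable (Spec_split_items content out) := by unfold Spec_split_items; infer_instance

-- ===== CLAIM (what is proved, stated in full; the proofs are below) =====
def Claim_equal_split_items : Prop := ∀ (content : String), Dom_split_items content → Spec_split_items content (split_items content)

-- ===== LEMMAS AND PROOFS =====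

/-- consecutive pairs of a list -/
def pvPairs {α : Type} (l : List α) : List (α × α) := l.zip l.tail

/-- the boundary condition at offset `p` (Nat form of the shared test of both ports) -/
def pvC (pfx t : List Char) (p : Nat) : Bool :=
  (('\n' :: pfx).isPrefixOf (t.drop p)) && (t[p + pfx.length + 1]? != some ' ')

/-- boundary offsets below `n` -/
def pvBs (c : Nat → Bool) (n : Nat) : List Nat := (List.range n).filter c

/-- the slice emitted for a consecutive boundary pair -/
def pvSeg (t : List Char) (be : Nat × Nat) : List Char :=
  (t.drop (be.1 + 1)).take (be.2 - (be.1 + 1))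

/-- A's loop body, Nat-indexed -/
def pvStep (pfx t : List Char) (st : List (List Char) × List Char) (p : Nat) :
    List (List Char) × List Char :=
  if pvC pfx t p then (st.1 ++ [st.2.tail], [t.getD p ' '])
  else (st.1, st.2 ++ [t.getD p ' '])

lemma pvBs_lt (c : Nat → Bool) (n : Nat) : ∀ x ∈ pvBs c n, x < n := by
  intro x hx
  exact List.mem_range.mp (List.mem_of_mem_filter hx)

lemma pvBs_lastD_le (c : Nat → Bool) (n : Nat) : (pvBs c n).getLastD 0 ≤ n := by
  cases h : (pvBs c n).getLast? with
  | none => simp [List.getLastD_eq_getLast?, h]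
  | some a =>
    have ha : a ∈ pvBs c n := List.mem_of_getLast? h
    simp only [List.getLastD_eq_getLast?, h, Option.getD_some]
    exact le_of_lt (pvBs_lt c n a ha)

lemma pvPairs_cons_concat {α : Type} (a : α) (l : List α) (x : α) :
    pvPairs (a :: (l ++ [x])) = pvPairs (a :: l) ++ [(l.getLastD a, x)] := by
  induction l generalizing a with
  | nil => simp [pvPairs]
  | cons b l' ih =>
    simp only [pvPairs, List.cons_append, List.tail_cons, List.zip_cons_cons] at *
    rw [ih b]
    rw [List.getLastD_cons]

lemma pvPairs_cons_tail {α : Type} (a : α) (l : List α) :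
    (pvPairs (a :: l)).tail = pvPairs l := by
  cases l with
  | nil => simp [pvPairs]
  | cons b l' => simp [pvPairs]

lemma pvMapTail {α β : Type} (f : α → β) (l : List α) : (l.map f).tail = l.tail.map f := by
  cases l <;> simp

/-- A's loop invariant: after the first `n` positions, `result` holds the segments between
consecutive boundaries seen so far (with the virtual boundary 0 in front) and `item` is the
raw text since the last boundary. -/
lemma pvLoopA (pfx t : List Char) (n : Nat) (hn : n ≤ t.length) :
    (List.range n).foldl (pvStep pfx t) ([], []) =
      ((pvPairs (0 :: pvBs (pvC pfx t) n)).map (pvSeg t),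
       (t.take n).drop ((pvBs (pvC pfx t) n).getLastD 0)) := by
  induction n with
  | zero => simp [pvBs, pvPairs]
  | succ n ih =>
    have hn' : n ≤ t.length := Nat.le_of_succ_le hn
    have hlt : n < t.length := hn
    have hlb : (pvBs (pvC pfx t) n).getLastD 0 ≤ n := pvBs_lastD_le _ n
    rw [List.range_succ, List.foldl_append, ih hn', List.foldl_cons, List.foldl_nil]
    have hbs : pvBs (pvC pfx t) (n + 1)
        = pvBs (pvC pfx t) n ++ if pvC pfx t n then [n] else [] := by
      simp [pvBs, List.range_succ, List.filter_singleton]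
    by_cases hc : pvC pfx t n
    · rw [pvStep, if_pos hc, hbs, if_pos hc]
      dsimp only
      simp only [Prod.mk.injEq]
      refine ⟨?_, ?_⟩
      · -- result component
        rw [pvPairs_cons_concat, List.map_append]
        congr 1
        simp only [List.map_cons, List.map_nil, pvSeg]
        rw [List.tail_drop, List.drop_take]
      · -- item component
        rw [List.getLastD_concat, List.drop_take]
        have h1 : (n + 1) - n = 1 := by omega
        have h2 : List.take 1 (List.drop n t) = [t[n]] := by
          rw [List.drop_eq_getElem_cons hlt, show (1 : Nat) = 0 + 1 from rfl,
            List.take_succ_cons, List.take_zero]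
        rw [h1, h2, List.getD_eq_getElem t ' ' hlt]
    · rw [pvStep, if_neg hc, hbs, if_neg hc, List.append_nil]
      dsimp only
      simp only [Prod.mk.injEq, true_and]
      rw [List.take_add_one, List.getElem?_eq_getElem hlt]
      have hlen : (pvBs (pvC pfx t) n).getLastD 0 ≤ (t.take n).length := by
        simpa [List.length_take, Nat.min_eq_left hn'] using hlb
      rw [List.drop_append_of_le_length hlen]
      simp [List.getElem?_eq_getElem hlt]

/-- A's Int-indexed loop body at a cast index is `pvStep`. -/
lemma pvBody (pfx t : List Char) (st : List (List Char) × List Char) (p : Nat) :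
    (if PySem.Chars.startswith (PySem.List.slice t (some (p : Int)) none) ('\n' :: pfx)
        && (PySem.List.pyGet? t ((p : Int) + PySem.List.len pfx + 1) != some ' ')
     then (st.1 ++ [PySem.List.slice st.2 (some 1) none], [PySem.List.pyGetD t (p : Int) ' '])
     else (st.1, st.2 ++ [PySem.List.pyGetD t (p : Int) ' '])) = pvStep pfx t st p := by
  have hidx : ((p : Int) + PySem.List.len pfx + 1) = ((p + pfx.length + 1 : Nat) : Int) := by
    rw [PySem.List.len_eq]; push_cast; ring
  rw [hidx]
  simp only [pvStep, pvC, PySem.Chars.startswith, PySem.List.slice_from_natCast,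
    PySem.List.slice_from_one, PySem.List.pyGetD_natCast, PySem.List.pyGet?_natCast]
  rfl

lemma pvTakeBeq (s m : List Char) : (s.take m.length == m) = m.isPrefixOf s := by
  rw [Bool.eq_iff_iff, beq_iff_eq, List.isPrefixOf_iff_prefix, List.prefix_iff_eq_take]
  exact eq_comm

/-- B's filter test at a cast index is `pvC`. -/
lemma pvBodyB (pfx t : List Char) (p : Nat) :
    ((PySem.List.slice t (some (p : Int)) (some ((p : Int) + PySem.List.len ('\n' :: pfx)))
        == ('\n' :: pfx))
      && (PySem.List.pyGet? t ((p : Int) + PySem.List.len ('\n' :: pfx)) != some ' '))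
    = pvC pfx t p := by
  have hlen : PySem.List.len ('\n' :: pfx) = ((pfx.length + 1 : Nat) : Int) := by
    rw [PySem.List.len_eq]; simp
  have hidx : ((p : Int) + ((pfx.length + 1 : Nat) : Int)) = ((p + pfx.length + 1 : Nat) : Int) := by
    push_cast; ring
  rw [hlen, hidx, PySem.List.slice_natCast]
  have harith : p + pfx.length + 1 - p = pfx.length + 1 := by omega
  rw [harith, show pfx.length + 1 = ('\n' :: pfx).length from by simp, pvTakeBeq]
  unfold pvC
  rw [PySem.List.pyGet?_natCast]

lemma pvAfinal (t : List Char) (bs : List Nat) :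
    ((pvPairs (0 :: bs)).map (pvSeg t)).tail.map String.ofList
      = (pvPairs bs).map (fun be => String.ofList (pvSeg t be)) := by
  rw [pvMapTail, pvPairs_cons_tail, List.map_map]
  rfl

lemma pvZipMapCast (t : List Char) (bs tl : List Nat) :
    ((bs.map (fun k : Nat => (k : Int))).zip (tl.map (fun k : Nat => (k : Int)))).map
        (fun be => String.ofList (PySem.List.slice t (some (be.1 + 1)) (some be.2)))
      = (bs.zip tl).map (fun be => String.ofList (pvSeg t be)) := by
  induction bs generalizing tl with
  | nil => rfl
  | cons b bs ih =>
    cases tl with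
    | nil => rfl
    | cons e tl =>
      simp only [List.map_cons, List.zip_cons_cons, ih]
      congr 1
      have h1 : ((b : Int) + 1) = ((b + 1 : Nat) : Int) := by push_cast; ring
      rw [h1, PySem.List.slice_natCast]
      rfl

lemma pvBfinal (t : List Char) (bs : List Nat) :
    ((bs.map (fun k : Nat => (k : Int))).zip ((bs.map (fun k : Nat => (k : Int))).tail)).map
        (fun be => String.ofList (PySem.List.slice t (some (be.1 + 1)) (some be.2)))
      = (pvPairs bs).map (fun be => String.ofList (pvSeg t be)) := by
  rw [pvMapTail]
  exact pvZipMapCast t bs bs.tail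

/-- the two ports agree, for any prefix and sentinel-extended text -/
lemma pvEq (pfx t : List Char) :
    (PySem.List.slice ((PySem.List.pyRange 0 (PySem.List.len t) 1).foldl
        (fun (st : List (List Char) × List Char) (pos : Int) =>
          if PySem.Chars.startswith (PySem.List.slice t (some pos) none) ('\n' :: pfx)
              && (PySem.List.pyGet? t (pos + PySem.List.len pfx + 1) != some ' ')
          then (st.1 ++ [PySem.List.slice st.2 (some 1) none], [PySem.List.pyGetD t pos ' '])
          else (st.1, st.2 ++ [PySem.List.pyGetD t pos ' '])) ([], [])).1 (some 1) none).map
      String.ofList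
    =
    (((PySem.List.pyRange 0 (PySem.List.len t) 1).filter
        (fun p => (PySem.List.slice t (some p) (some (p + PySem.List.len ('\n' :: pfx)))
                    == ('\n' :: pfx))
                  && (PySem.List.pyGet? t (p + PySem.List.len ('\n' :: pfx)) != some ' '))).zip
      (PySem.List.slice ((PySem.List.pyRange 0 (PySem.List.len t) 1).filter
        (fun p => (PySem.List.slice t (some p) (some (p + PySem.List.len ('\n' :: pfx)))
                    == ('\n' :: pfx))
                  && (PySem.List.pyGet? t (p + PySem.List.len ('\n' :: pfx)) != some ' ')))
        (some 1) none)).map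
      (fun be => String.ofList (PySem.List.slice t (some (be.1 + 1)) (some be.2))) := by
  rw [PySem.List.len_eq t, PySem.List.pyRange_zero_nat, List.filter_map, List.foldl_map]
  simp only [pvBody]
  rw [pvLoopA pfx t t.length (le_refl _)]
  dsimp only
  simp only [PySem.List.slice_from_one, Function.comp_def, pvBodyB]
  rw [pvAfinal]
  exact (pvBfinal t ((List.range t.length).filter (pvC pfx t))).symm

-- ===== VERDICT (by name: the statement is the Claim_ definition above) =====
theorem split_items_spec : Claim_equal_split_items := by
  intro content _
  show split_items content = split_items_alt content
  simp only [split_items, split_items_alt]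
  exact pvEq _ _
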